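-- pv_equiv track=rewrite | github.com/Interrobang01/openrecall | openrecall/app.py | _apply_proximity_dedup
-- ===== SOURCE A (Python) =====
-- from typing import Dict, List, Optional, Tuple
--
-- def _apply_proximity_dedup(results: List[dict], proximity_seconds: int) -> List[dict]:
--     """Greedy dedupe by timestamp proximity, preserving top-ranked representatives."""
--     if proximity_seconds <= 0:
--       return results
--
--     kept: List[dict] = []
--     kept_timestamps: List[int] = []
--     for result in results:
--       timestamp = int(result.get("timestamp") or 0)
--       is_blocked = any(abs(timestamp - existing_ts) < proximity_seconds for existing_ts in kept_timestamps)
--       if is_blocked: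
--         continue
--       kept.append(result)
--       kept_timestamps.append(timestamp)
--     return kept
-- ===== SOURCE B (Python) =====
-- def _apply_proximity_dedup(results, proximity_seconds):
--     """Greedy dedupe by timestamp proximity, preserving top-ranked representatives.
--
--     Alternative strategy: instead of scanning all kept timestamps per result,
--     keep them in a sorted
--     list and binary-search the insertion point: only the two neighbours can be
--     the nearest kept timestamp."""
--     if proximity_seconds <= 0:
--         return results
--
--     kept = []
--     ts_sorted = []
--     for result in results:
--         timestamp = int(result.get("timestamp") or 0)
--         lo, hi = 0, len(ts_sorted)
--         while lo < hi:
--             mid = (lo + hi) // 2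
--             if ts_sorted[mid] < timestamp:
--                 lo = mid + 1
--             else:
--                 hi = mid
--         if lo > 0 and timestamp - ts_sorted[lo - 1] < proximity_seconds:
--             continue
--         if lo < len(ts_sorted) and ts_sorted[lo] - timestamp < proximity_seconds:
--             continue
--         kept.append(result)
--         ts_sorted.insert(lo, timestamp)
--     return kept
-- ===== Notes on version B (the rewrite author's own statement) =====
-- stated objective: alternative
-- what changed: B keeps the kept timestamps in a sorted list and binary-searches the insertion point, testing only the two neighbouring timestamps instead of scanning every kept timestamp with any().
import Mathlib
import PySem

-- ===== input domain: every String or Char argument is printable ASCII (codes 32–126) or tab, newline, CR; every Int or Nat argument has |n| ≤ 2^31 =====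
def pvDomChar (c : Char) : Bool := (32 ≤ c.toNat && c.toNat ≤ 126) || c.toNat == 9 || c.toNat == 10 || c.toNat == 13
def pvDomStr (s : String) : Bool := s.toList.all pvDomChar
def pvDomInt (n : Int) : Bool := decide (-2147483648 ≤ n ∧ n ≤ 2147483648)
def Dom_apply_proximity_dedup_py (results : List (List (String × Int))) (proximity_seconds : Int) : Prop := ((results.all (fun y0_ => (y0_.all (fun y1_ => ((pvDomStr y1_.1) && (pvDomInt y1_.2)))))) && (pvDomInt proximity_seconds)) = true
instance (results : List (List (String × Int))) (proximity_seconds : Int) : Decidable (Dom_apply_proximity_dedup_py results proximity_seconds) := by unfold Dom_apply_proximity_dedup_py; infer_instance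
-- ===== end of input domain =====

-- B replaces A's linear any() scan over all kept timestamps by a sorted list plus a
-- hand-written binary search that tests only the two neighbouring timestamps (objective: alternative).

-- shared extraction step: int(result.get("timestamp") or 0); since 0 is the only falsy
-- int and int() is the identity on ints, this is a first-match lookup with default 0
def pvGetTs (result : List (String × Int)) : Int :=
  (((result.find? (fun p => p.1 == "timestamp")).map Prod.snd).getD 0)

-- ===== PORT A =====
-- the for-loop of A, state (kept, kept_timestamps)
def pvALoop (p : Int) (kept : List (List (String × Int))) (kts : List Int) :
    List (List (String × Int)) → List (List (String × Int))
  | [] => kept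
  | r :: rest =>
    let t := pvGetTs r
    let blocked := kts.any (fun e => decide (|t - e| < p))
    if blocked then pvALoop p kept kts rest
    else pvALoop p (kept ++ [r]) (kts ++ [t]) rest

def apply_proximity_dedup_py (results : List (List (String × Int))) (proximity_seconds : Int) : List (List (String × Int)) :=
  if proximity_seconds ≤ 0 then results
  else pvALoop proximity_seconds [] [] results

-- ===== PORT B =====
-- Source B's while-loop (binary search for the insertion point); the index mid is always
-- in range when lo < hi ≤ a.length, so getD with default 0 is exact there
def pvBSearch (a : List Int) (x : Int) (lo hi : Nat) : Nat :=
  if _h : lo < hi then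
    let mid := (lo + hi) / 2
    if a.getD mid 0 < x then pvBSearch a x (mid + 1) hi else pvBSearch a x lo mid
  else lo
termination_by hi - lo
decreasing_by all_goals omega

-- the for-loop of B, state (kept, ts_sorted)
def pvBLoop (p : Int) (kept : List (List (String × Int))) (ts : List Int) :
    List (List (String × Int)) → List (List (String × Int))
  | [] => kept
  | r :: rest =>
    let t := pvGetTs r
    let lo := pvBSearch ts t 0 ts.length
    if 0 < lo ∧ t - ts.getD (lo - 1) 0 < p then pvBLoop p kept ts rest
    else if lo < ts.length ∧ ts.getD lo 0 - t < p then pvBLoop p kept ts rest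
    else pvBLoop p (kept ++ [r]) (PySem.List.insert ts (lo : Int) t) rest

def apply_proximity_dedup_py_alt (results : List (List (String × Int))) (proximity_seconds : Int) : List (List (String × Int)) :=
  if proximity_seconds ≤ 0 then results
  else pvBLoop proximity_seconds [] [] results

-- ===== PRECONDITION & SPEC =====
def Spec_apply_proximity_dedup_py (results : List (List (String × Int))) (proximity_seconds : Int) (out : List (List (String × Int))) : Prop := out = apply_proximity_dedup_py_alt results proximity_seconds
instance (results : List (List (String × Int))) (proximity_seconds : Int) (out : List (List (String × Int))) : Decidable (Spec_apply_proximity_dedup_py results proximity_seconds out) := by unfold Spec_apply_proximity_dedup_py; infer_instance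

-- ===== CLAIM (what is proved, stated in full; the proofs are below) =====
def Claim_equal_apply_proximity_dedup_py : Prop := ∀ (results : List (List (String × Int))) (proximity_seconds : Int), Dom_apply_proximity_dedup_py results proximity_seconds → Spec_apply_proximity_dedup_py results proximity_seconds (apply_proximity_dedup_py results proximity_seconds)

-- ===== LEMMAS AND PROOFS =====

-- monotonicity of a sorted list through getD
theorem pvMono (a : List Int) (hs : a.Pairwise (· ≤ ·)) {i j : Nat}
    (hij : i ≤ j) (hj : j < a.length) : a.getD i 0 ≤ a.getD j 0 := by
  rw [List.getD_eq_getElem a 0 (lt_of_le_of_lt hij hj), List.getD_eq_getElem a 0 hj]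
  rcases Nat.lt_or_ge i j with h | h
  · exact List.pairwise_iff_getElem.mp hs i j _ _ h
  · have : i = j := le_antisymm hij h
    subst this; exact le_refl _

-- binary-search invariant: on a sorted list the result splits [lo,hi) into entries < x and ≥ x
theorem pvBSearch_spec (a : List Int) (x : Int) (hs : a.Pairwise (· ≤ ·)) :
    ∀ lo hi : Nat, lo ≤ hi → hi ≤ a.length →
    lo ≤ pvBSearch a x lo hi ∧ pvBSearch a x lo hi ≤ hi ∧
    (∀ j, lo ≤ j → j < pvBSearch a x lo hi → a.getD j 0 < x) ∧
    (∀ j, pvBSearch a x lo hi ≤ j → j < hi → x ≤ a.getD j 0) := by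
  intro lo hi
  induction lo, hi using pvBSearch.induct (a := a) (x := x) with
  | case1 lo hi h _mid hmid ih =>
    intro hlh hhl
    rw [pvBSearch]
    have hm : _mid = (lo + hi) / 2 := rfl
    rw [hm] at hmid ih
    rw [dif_pos h, if_pos hmid]
    obtain ⟨h1, h2, h3, h4⟩ := ih (by omega) hhl
    refine ⟨by omega, h2, ?_, h4⟩
    intro j hj1 hj2
    by_cases hc : (lo + hi) / 2 + 1 ≤ j
    · exact h3 j hc hj2
    · exact lt_of_le_of_lt (pvMono a hs (by omega) (by omega)) hmid
  | case2 lo hi h _mid hmid ih =>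
    intro hlh hhl
    rw [pvBSearch]
    have hm : _mid = (lo + hi) / 2 := rfl
    rw [hm] at hmid ih
    rw [dif_pos h, if_neg hmid]
    obtain ⟨h1, h2, h3, h4⟩ := ih (by omega) (by omega)
    refine ⟨h1, by omega, h3, ?_⟩
    intro j hj1 hj2
    by_cases hc : j < (lo + hi) / 2
    · exact h4 j hj1 hc
    · exact le_trans (le_of_not_gt hmid) (pvMono a hs (by omega) (by omega))
  | case3 lo hi h =>
    intro hlh hhl
    rw [pvBSearch]
    rw [dif_neg h]
    exact ⟨le_refl _, hlh, fun j h1 h2 => absurd (lt_of_le_of_lt h1 h2) (lt_irrefl _),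
      fun j h1 h2 => absurd (lt_of_le_of_lt h1 h2) h⟩

-- the two-neighbour test at the insertion point equals A's "some kept timestamp is close"
theorem pvNeighbor (ts : List Int) (t p : Int) (hs : ts.Pairwise (· ≤ ·)) :
    ((0 < pvBSearch ts t 0 ts.length ∧ t - ts.getD (pvBSearch ts t 0 ts.length - 1) 0 < p) ∨
     (pvBSearch ts t 0 ts.length < ts.length ∧ ts.getD (pvBSearch ts t 0 ts.length) 0 - t < p))
    ↔ ∃ e ∈ ts, |t - e| < p := by
  obtain ⟨h1, h2, h3, h4⟩ := pvBSearch_spec ts t hs 0 ts.length (Nat.zero_le _) (le_refl _)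
  set lo := pvBSearch ts t 0 ts.length with hlo
  constructor
  · rintro (⟨hpos, hlt⟩ | ⟨hlt, hgt⟩)
    · refine ⟨ts.getD (lo - 1) 0, ?_, ?_⟩
      · rw [List.getD_eq_getElem ts 0 (by omega)]; exact List.getElem_mem _
      · have := h3 (lo - 1) (Nat.zero_le _) (by omega)
        rw [abs_of_pos (by omega)]; exact hlt
    · refine ⟨ts.getD lo 0, ?_, ?_⟩
      · rw [List.getD_eq_getElem ts 0 hlt]; exact List.getElem_mem _
      · have := h4 lo (le_refl _) hlt
        rw [abs_of_nonpos (by omega), neg_sub]; exact hgt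
  · rintro ⟨e, he, habs⟩
    obtain ⟨j, hj, rfl⟩ := List.mem_iff_getElem.mp he
    rw [← List.getD_eq_getElem ts 0 hj] at habs
    by_cases hje : ts.getD j 0 < t
    · have hjlo : j < lo := by
        by_contra hc
        exact absurd (h4 j (le_of_not_gt hc) hj) (not_le.mpr hje)
      left
      refine ⟨by omega, ?_⟩
      have hmono := pvMono ts hs (i := j) (j := lo - 1) (by omega) (by omega)
      have : |t - ts.getD j 0| = t - ts.getD j 0 := abs_of_pos (by omega)
      omega
    · have hjlo : lo ≤ j := by
        by_contra hc
        exact absurd (h3 j (Nat.zero_le _) (lt_of_not_ge hc)) (by omega)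
      right
      refine ⟨by omega, ?_⟩
      have hmono := pvMono ts hs (i := lo) (j := j) hjlo hj
      have : |t - ts.getD j 0| = ts.getD j 0 - t := by rw [abs_of_nonpos (by omega), neg_sub]
      omega
  
-- inserting at the binary-search position keeps the list sorted
theorem pvInsert_sorted (ts : List Int) (t : Int) (hs : ts.Pairwise (· ≤ ·)) :
    (PySem.List.insert ts ((pvBSearch ts t 0 ts.length : Nat) : Int) t).Pairwise (· ≤ ·) := by
  obtain ⟨h1, h2, h3, h4⟩ := pvBSearch_spec ts t hs 0 ts.length (Nat.zero_le _) (le_refl _)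
  set lo := pvBSearch ts t 0 ts.length with hlo
  rw [PySem.List.insert_natCast ts lo t h2]
  have htake : ∀ e ∈ ts.take lo, e < t := by
    intro e he
    obtain ⟨j, hj, rfl⟩ := List.mem_iff_getElem.mp he
    have hjl : j < lo := lt_of_lt_of_le hj (by simp)
    rw [List.getElem_take]
    rw [← List.getD_eq_getElem ts 0]
    exact h3 j (Nat.zero_le _) hjl
  have hdrop : ∀ e ∈ ts.drop lo, t ≤ e := by
    intro e he
    obtain ⟨j, hj, rfl⟩ := List.mem_iff_getElem.mp he
    rw [List.getElem_drop]
    rw [← List.getD_eq_getElem ts 0]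
    exact h4 (lo + j) (by omega) (by simp at hj; omega)
  rw [List.pairwise_append]
  refine ⟨hs.sublist (List.take_sublist _ _), ?_, ?_⟩
  · rw [List.pairwise_cons]
    exact ⟨hdrop, hs.sublist (List.drop_sublist _ _)⟩
  · intro a ha b hb
    rcases List.mem_cons.mp hb with rfl | hb
    · exact le_of_lt (htake a ha)
    · exact le_trans (le_of_lt (htake a ha)) (hdrop b hb)

-- membership in the inserted list
theorem pvInsert_mem (ts : List Int) (t : Int) (hs : ts.Pairwise (· ≤ ·)) (e : Int) :
    e ∈ PySem.List.insert ts ((pvBSearch ts t 0 ts.length : Nat) : Int) t ↔ e = t ∨ e ∈ ts := by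
  obtain ⟨h1, h2, h3, h4⟩ := pvBSearch_spec ts t hs 0 ts.length (Nat.zero_le _) (le_refl _)
  rw [PySem.List.insert_natCast ts _ t h2]
  have hsplit : e ∈ ts ↔ e ∈ ts.take (pvBSearch ts t 0 ts.length) ∨ e ∈ ts.drop (pvBSearch ts t 0 ts.length) := by
    conv_lhs => rw [← List.take_append_drop (pvBSearch ts t 0 ts.length) ts]
    exact List.mem_append
  simp only [List.mem_append, List.mem_cons]
  rw [hsplit]
  tauto

-- the two loops agree whenever B's list is sorted and carries the same set of timestamps
theorem pvLoop_eq (p : Int) :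
    ∀ (rest : List (List (String × Int))) (kept : List (List (String × Int)))
      (kts ts : List Int), ts.Pairwise (· ≤ ·) → (∀ e, e ∈ kts ↔ e ∈ ts) →
    pvALoop p kept kts rest = pvBLoop p kept ts rest := by
  intro rest
  induction rest with
  | nil => intro kept kts ts _ _; rfl
  | cons r rest ih =>
    intro kept kts ts hsort hmem
    simp only [pvALoop, pvBLoop]
    set t := pvGetTs r with ht
    set lo := pvBSearch ts t 0 ts.length with hlo
    have hany : (kts.any (fun e => decide (|t - e| < p)) = true) ↔
        ((0 < lo ∧ t - ts.getD (lo - 1) 0 < p) ∨ (lo < ts.length ∧ ts.getD lo 0 - t < p)) := by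
      rw [List.any_eq_true]
      rw [pvNeighbor ts t p hsort]
      constructor
      · rintro ⟨e, he, hd⟩; exact ⟨e, (hmem e).mp he, of_decide_eq_true hd⟩
      · rintro ⟨e, he, hd⟩; exact ⟨e, (hmem e).mpr he, decide_eq_true hd⟩
    by_cases hc1 : 0 < lo ∧ t - ts.getD (lo - 1) 0 < p
    · rw [if_pos hc1, if_pos (hany.mpr (Or.inl hc1))]
      exact ih kept kts ts hsort hmem
    · rw [if_neg hc1]
      by_cases hc2 : lo < ts.length ∧ ts.getD lo 0 - t < p
      · rw [if_pos hc2, if_pos (hany.mpr (Or.inr hc2))]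
        exact ih kept kts ts hsort hmem
      · rw [if_neg hc2, if_neg (by rw [hany]; tauto)]
        refine ih (kept ++ [r]) (kts ++ [t]) _ (pvInsert_sorted ts t hsort) ?_
        intro e
        rw [pvInsert_mem ts t hsort e]
        simp [List.mem_append]
        rw [hmem e]
        tauto

-- ===== VERDICT (by name: the statement is the Claim_ definition above) =====
theorem apply_proximity_dedup_py_spec : Claim_equal_apply_proximity_dedup_py := by
  intro results p _
  unfold Spec_apply_proximity_dedup_py apply_proximity_dedup_py apply_proximity_dedup_py_alt
  by_cases hp : p ≤ 0
  · rw [if_pos hp, if_pos hp]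
  · rw [if_neg hp, if_neg hp]
    exact pvLoop_eq p results [] [] [] List.Pairwise.nil (fun e => by simp)
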